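-- pv_equiv track=rewrite | github.com/Ghoreish/usaco | beads/beads.py | right1
-- ===== SOURCE A (Python) =====
-- def right1(x):
--     l = "begin"
--     n = 0
--     for i in range(-1,-len(x),-1):
--         if x[i] == l or l == "begin":
--             n += 1
--         else:
--             break
--         l = x[i]
--     return n
-- ===== SOURCE B (Python) =====
-- def right1(x):
--     if not x:
--         return 0
--     kept = len(x.rstrip(x[-1]))
--     return min(len(x) - kept, len(x) - 1)
-- ===== Notes on version B (the rewrite author's own statement) =====
-- stated objective: idiomatic
-- what changed: A scans backwards with a previous-character sentinel, a counter and an early break; B has no loop at all: it strips the trailing run with str.rstrip(x[-1]), measures the run as a length difference, and caps it at len(x)-1.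
import Mathlib
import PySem

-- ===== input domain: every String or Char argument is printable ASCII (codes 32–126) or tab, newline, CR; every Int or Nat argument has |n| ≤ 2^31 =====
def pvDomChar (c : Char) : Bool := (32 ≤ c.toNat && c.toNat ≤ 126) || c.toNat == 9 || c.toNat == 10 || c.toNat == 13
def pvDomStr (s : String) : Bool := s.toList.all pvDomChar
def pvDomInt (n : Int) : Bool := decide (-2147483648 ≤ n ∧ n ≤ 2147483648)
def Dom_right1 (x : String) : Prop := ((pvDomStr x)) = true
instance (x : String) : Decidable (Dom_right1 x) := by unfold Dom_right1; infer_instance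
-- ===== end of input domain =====

-- B change in one line: A's backward scan with a previous-character sentinel and break is
-- replaced by a loop-free pipeline — strip the trailing run with rstrip(x[-1]), measure it
-- as a length difference, cap at len(x)-1 (objective: idiomatic, same cost).

-- ===== PORT A =====
-- loop 'for i in range(-1, -len(x), -1)' with early break; state (l, n); the Python sentinel
-- l = "begin" is the 'none' case of Option Char (afterwards l is always the 1-char string x[i]).
-- Every index in the range satisfies -len(x) < i ≤ -1, so x[i] never raises; pyGetD is exact here.
def right1Go (cs : List Char) : List Int → Option Char → Int → Int
  | [], _, n => n
  | i :: is, l, n =>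
      let c := PySem.List.pyGetD cs i ' '
      if l = some c ∨ l = none then
        right1Go cs is (some c) (n + 1)
      else n

def right1 (x : String) : Int :=
  right1Go x.toList (PySem.List.pyRange (-1) (-(PySem.Str.len x)) (-1)) none 0

-- ===== PORT B =====
-- hand port of Python str.rstrip(chars): drop trailing characters belonging to chars
-- (exact: CPython removes the longest trailing run of characters from the chars set).
def pyRstrip (cs chars : List Char) : List Char :=
  (cs.reverse.dropWhile (fun c => chars.contains c)).reverse

def right1_alt (x : String) : Int :=
  let cs := x.toList
  if cs = [] then 0
  else
    let last := cs.getLastD ' '                    -- x[-1]; cs nonempty here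
    let kept := (pyRstrip cs [last]).length        -- len(x.rstrip(x[-1]))
    min ((cs.length : Int) - (kept : Int)) ((cs.length : Int) - 1)

-- ===== PRECONDITION & SPEC =====
def Spec_right1 (x : String) (out : Int) : Prop := out = right1_alt x
instance (x : String) (out : Int) : Decidable (Spec_right1 x out) := by unfold Spec_right1; infer_instance

-- ===== CLAIM (what is proved, stated in full; the proofs are below) =====
def Claim_equal_right1 : Prop := ∀ (x : String), Dom_right1 x → Spec_right1 x (right1 x)

-- ===== LEMMAS AND PROOFS =====

-- length of the all-equal-to-c prefix
def prefixRun (c : Char) : List Char → Nat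
  | [] => 0
  | d :: t => if d = c then 1 + prefixRun c t else 0

-- A's loop over an index list is the same loop over the fetched characters
def goA (l0 : Option Char) (n : Int) : List Char → Int
  | [] => n
  | c :: cs => if l0 = some c ∨ l0 = none then goA (some c) (n + 1) cs else n

lemma right1Go_eq_goA (cs : List Char) (is : List Int) (l : Option Char) (n : Int) :
    right1Go cs is l n = goA l n (is.map (fun i => PySem.List.pyGetD cs i ' ')) := by
  induction is generalizing l n with
  | nil => rfl
  | cons i is ih =>
      simp only [right1Go, List.map, goA]
      split_ifs with h
      · exact ih _ _
      · rfl

lemma goA_some (c : Char) (n : Int) (l : List Char) :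
    goA (some c) n l = n + prefixRun c l := by
  induction l generalizing c n with
  | nil => simp [goA, prefixRun]
  | cons d t ih =>
      simp only [goA, prefixRun]
      by_cases h : d = c
      · subst h; simp [ih]; ring
      · simp [h, Ne.symm]

lemma goA_none_cons (c : Char) (t : List Char) (n : Int) :
    goA none n (c :: t) = n + 1 + prefixRun c t := by
  simp [goA, goA_some]

lemma prefixRun_take (c : Char) (t : List Char) (m : Nat) :
    prefixRun c (t.take m) = min (prefixRun c t) m := by
  induction t generalizing m with
  | nil => simp [prefixRun]
  | cons d t ih =>
      cases m with
      | zero => simp [prefixRun]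
      | succ m =>
          simp only [List.take, prefixRun]
          by_cases h : d = c
          · simp [h, ih]; omega
          · simp [h]

-- the character list A actually visits: the reversed string minus its final element
lemma map_pyGetD_range_neg (cs : List Char) :
    (PySem.List.pyRange (-1) (-((cs.length : Int))) (-1)).map
        (fun i => PySem.List.pyGetD cs i ' ')
      = cs.reverse.take (cs.length - 1) := by
  rw [PySem.List.pyRange_neg_one]
  have hlen : ((-1 : Int) - -(cs.length : Int)).toNat = cs.length - 1 := by omega
  rw [hlen, List.map_map]
  apply List.ext_getElem
  · simp
  · intro k h1 h2
    simp only [List.getElem_map, List.getElem_range, Function.comp_apply,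
      List.getElem_take, List.getElem_reverse]
    have hk : k < cs.length - 1 := by simpa using h1
    have h1k : 0 < k + 1 := Nat.succ_pos k
    have h2k : k + 1 ≤ cs.length := by omega
    have : (-1 : Int) - (k : Int) = -((k + 1 : Nat) : Int) := by push_cast; ring
    rw [this]
    unfold PySem.List.pyGetD
    rw [PySem.List.pyGet?_neg_natCast cs (k + 1) h1k h2k]
    have hlt : cs.length - (k + 1) < cs.length := by omega
    simp [List.getElem?_eq_getElem hlt]
    congr 1
    omega

lemma prefixRun_le (c : Char) (l : List Char) : prefixRun c l ≤ l.length := by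
  induction l with
  | nil => simp [prefixRun]
  | cons d t ih => simp only [prefixRun, List.length_cons]; split_ifs <;> omega

lemma goA_take_min (c : Char) (t : List Char) :
    goA none 0 ((c :: t).take t.length) = min (1 + (prefixRun c t : Int)) (t.length : Int) := by
  cases t with
  | nil => simp [goA]
  | cons d t' =>
      have htake : ((c :: d :: t').take (d :: t').length) = c :: (d :: t').take t'.length := by
        simp [List.take_succ_cons]
      rw [htake, goA_none_cons, prefixRun_take]
      have hle := prefixRun_le c (d :: t')
      simp only [List.length_cons] at *
      omega

-- dropWhile (∈ [c]) removes exactly the all-equal-to-c prefix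
lemma length_dropWhile_mem_single (c : Char) (t : List Char) :
    (t.dropWhile (fun d => [c].contains d)).length = t.length - prefixRun c t := by
  induction t with
  | nil => simp [prefixRun]
  | cons d t ih =>
      rw [List.dropWhile_cons]
      by_cases h : d = c
      · subst h
        have := prefixRun_le d t
        rw [if_pos (by simp), ih]
        simp only [prefixRun, List.length_cons, if_true]
        omega
      · rw [if_neg (by simp [h])]
        simp [prefixRun, h]

-- ===== VERDICT (by name: the statement is the Claim_ definition above) =====
theorem right1_spec : Claim_equal_right1 := by
  intro x _
  unfold Spec_right1 right1 right1_alt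
  rw [PySem.Str.len_eq, right1Go_eq_goA, map_pyGetD_range_neg]
  set cs := x.toList with hcs
  by_cases hnil : cs = []
  · simp [hnil, goA]
  · rw [if_neg hnil]
    obtain ⟨c, t, hrev⟩ : ∃ c t, cs.reverse = c :: t := by
      cases h : cs.reverse with
      | nil => exact absurd (by simpa using h) hnil
      | cons c t => exact ⟨c, t, rfl⟩
    have hlast : cs.getLastD ' ' = c := by
      have : cs.getLast? = some c := by
        rw [← List.head?_reverse, hrev]; rfl
      simp [List.getLastD_eq_getLast?, this]
    have hlen : cs.length = t.length + 1 := by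
      have := congrArg List.length hrev
      simpa using this
    have hkept : (pyRstrip cs [c]).length = t.length - prefixRun c t := by
      unfold pyRstrip
      rw [hrev]
      have hc : ([c].contains c) = true := by simp
      rw [List.dropWhile_cons, if_pos hc, List.length_reverse]
      exact length_dropWhile_mem_single c t
    rw [hlast]
    dsimp only
    rw [hkept]
    have htake : cs.length - 1 = t.length := by omega
    rw [htake, hrev, goA_take_min c t]
    have hpr := prefixRun_le c t
    have : ((cs.length : Int)) = (t.length : Int) + 1 := by rw [hlen]; push_cast; ring
    rw [this]
    have hsub : ((t.length - prefixRun c t : Nat) : Int) = (t.length : Int) - (prefixRun c t : Int) := by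
      omega
    rw [hsub]
    omega
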